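-- pv_equiv track=rewrite | github.com/benofben/arbit | arbitWorkspace/rapidMiner/src/yahoo/quotes.py | reformatQuotes
-- ===== SOURCE A (Python) =====
-- def reformatQuotes(q, symbols):
-- 	newQ = {}
-- 	for symbol in symbols:
-- 		newQ[symbol]={}
-- 		for key in q:
-- 			if key != 'Symbol':
-- 				newQ[symbol][key]=[]
--
-- 	for i in range(0, len(q['Symbol'])):
-- 		symbol=q['Symbol'][i]
--
-- 		for key in q:
-- 			if key != 'Symbol':
-- 				newQ[symbol][key].append(q[key][i])
--
-- 	return newQ
-- ===== SOURCE B (Python) =====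
-- def reformatQuotes(q, symbols):
-- 	indexMap = {s: [] for s in symbols}
-- 	for i, s in enumerate(q['Symbol']):
-- 		indexMap[s].append(i)
-- 	return {symbol: {key: [q[key][i] for i in indexMap[symbol]]
-- 	                 for key in q if key != 'Symbol'}
-- 	        for symbol in symbols}
-- ===== Notes on version B (the rewrite author's own statement) =====
-- stated objective: alternative
-- what changed: B first builds a per-symbol index table of row positions in one enumerate pass and then constructs the whole result by a nested dict comprehension gathering q[key] at those positions, instead of A's pre-initialising every per-symbol dict and appending cell by cell while interleaving rows and keys.
-- outside the precondition, e.g. on reformatQuotes({'Symbol': ['ol', 'y']}, ['ym']): A returns {'ym': {}}, B raises KeyError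
import Mathlib
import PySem

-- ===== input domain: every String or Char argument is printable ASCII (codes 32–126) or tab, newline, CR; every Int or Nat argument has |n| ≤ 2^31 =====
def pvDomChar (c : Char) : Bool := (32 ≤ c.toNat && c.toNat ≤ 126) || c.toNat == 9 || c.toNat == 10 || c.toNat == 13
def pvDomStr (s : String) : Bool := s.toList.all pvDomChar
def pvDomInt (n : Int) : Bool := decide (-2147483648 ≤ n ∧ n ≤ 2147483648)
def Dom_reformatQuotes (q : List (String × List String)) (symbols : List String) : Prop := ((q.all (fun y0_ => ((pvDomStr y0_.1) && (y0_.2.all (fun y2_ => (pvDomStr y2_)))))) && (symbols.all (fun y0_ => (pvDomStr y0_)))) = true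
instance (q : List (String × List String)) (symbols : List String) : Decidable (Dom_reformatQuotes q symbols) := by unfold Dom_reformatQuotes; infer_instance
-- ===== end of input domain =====

-- B builds a per-symbol index of row positions in one pass and then gathers each column at
-- those positions, instead of A's pre-initialise-then-interleaved-append; same cost (alternative).

-- ===== PORT A =====
def reformatQuotes (q : List (String × List String)) (symbols : List String) : List (String × List (String × List String)) :=
  -- newQ = {}; for symbol in symbols: newQ[symbol] = {}; for key in q: if key != 'Symbol': newQ[symbol][key] = []
  let newQ : PySem.Dict String (PySem.Dict String (List String)) :=
    symbols.foldl (fun newQ symbol =>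
      newQ.insert symbol
        (q.foldl (fun inner kv =>
          if kv.1 ≠ "Symbol" then inner.insert kv.1 [] else inner)
          (PySem.Dict.mk []))) (PySem.Dict.mk [])
  -- for i in range(0, len(q['Symbol'])): symbol = q['Symbol'][i]; for key in q: if key != 'Symbol': newQ[symbol][key].append(q[key][i])
  let syms := (PySem.Dict.mk q).getD "Symbol" []
  let newQ :=
    (PySem.List.pyRange 0 (syms.length : Int) 1).foldl (fun newQ i =>
      let symbol := PySem.List.pyGetD syms i ""
      q.foldl (fun newQ kv =>
        if kv.1 ≠ "Symbol" then
          newQ.modify symbol (PySem.Dict.mk [])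
            (fun inner => inner.modify kv.1 []
              (fun l => l ++ [PySem.List.pyGetD ((PySem.Dict.mk q).getD kv.1 []) i ""]))
        else newQ) newQ) newQ
  newQ.items.map (fun p => (p.1, p.2.items))

-- ===== PORT B =====
def reformatQuotes_alt (q : List (String × List String)) (symbols : List String) : List (String × List (String × List String)) :=
  -- indexMap = {s: [] for s in symbols}
  let indexMap : PySem.Dict String (List Int) :=
    symbols.foldl (fun m s => m.insert s []) (PySem.Dict.mk [])
  -- for i, s in enumerate(q['Symbol']): indexMap[s].append(i)
  let indexMap :=
    (PySem.List.enumerate ((PySem.Dict.mk q).getD "Symbol" [])).foldl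
      (fun m p => m.modify p.2 [] (fun l => l ++ [p.1])) indexMap
  -- {symbol: {key: [q[key][i] for i in indexMap[symbol]] for key in q if key != 'Symbol'} for symbol in symbols}
  (symbols.foldl (fun acc symbol =>
    acc.insert symbol
      ((q.foldl (fun inner kv =>
          if kv.1 ≠ "Symbol" then
            inner.insert kv.1 ((indexMap.getD symbol []).map
              (fun i => PySem.List.pyGetD ((PySem.Dict.mk q).getD kv.1 []) i ""))
          else inner) (PySem.Dict.mk [])).items)) (PySem.Dict.mk [])).items

-- ===== PRECONDITION & SPEC =====
-- Pre_ excludes the inputs on which A raises ('Symbol' key missing, a column shorter than the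
-- 'Symbol' column, or a data symbol absent from `symbols` while q has another key), and also the
-- inputs with a data symbol absent from `symbols` but no non-'Symbol' key, where A's append loop
-- has no key to touch so A returns empty inner dicts while B's index build itself raises KeyError.
-- The Nodup conjunct only rules out association lists that do not encode a Python dict
-- (a dict cannot carry duplicate keys), not any input A can actually receive.
def Pre_reformatQuotes (q : List (String × List String)) (symbols : List String) : Prop :=
  (q.map Prod.fst).Nodup ∧
  "Symbol" ∈ q.map Prod.fst ∧
  (∀ s ∈ (PySem.Dict.mk q).getD "Symbol" ([] : List String), s ∈ symbols) ∧
  (∀ kv ∈ q, kv.1 ≠ "Symbol" →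
    ((PySem.Dict.mk q).getD "Symbol" ([] : List String)).length ≤ kv.2.length)
instance (q : List (String × List String)) (symbols : List String) : Decidable (Pre_reformatQuotes q symbols) := by unfold Pre_reformatQuotes; infer_instance

def pvWitness_reformatQuotes : (List (String × List String)) × List String :=
  ([("Symbol", ["A", "B", "A"]), ("Price", ["1", "2", "3"])], ["A", "B"])

def Spec_reformatQuotes (q : List (String × List String)) (symbols : List String) (out : List (String × List (String × List String))) : Prop := out = reformatQuotes_alt q symbols
instance (q : List (String × List String)) (symbols : List String) (out : List (String × List (String × List String))) : Decidable (Spec_reformatQuotes q symbols out) := by unfold Spec_reformatQuotes; infer_instance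

-- ===== CLAIM (what is proved, stated in full; the proofs are below) =====
def Claim_equal_reformatQuotes : Prop := ∀ (q : List (String × List String)) (symbols : List String), Dom_reformatQuotes q symbols → Pre_reformatQuotes q symbols → Spec_reformatQuotes q symbols (reformatQuotes q symbols)

-- ===== LEMMAS AND PROOFS =====

-- Shared proof-side abbreviations (used only by the proofs).
def pvSyms (q : List (String × List String)) : List String :=
  (PySem.Dict.mk q).getD "Symbol" []

def pvSym (q : List (String × List String)) (j : Int) : String :=
  PySem.List.pyGetD (pvSyms q) j ""

def pvElem (q : List (String × List String)) (k : String) (j : Int) : String :=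
  PySem.List.pyGetD ((PySem.Dict.mk q).getD k []) j ""

def pvRows (q : List (String × List String)) : List Int :=
  PySem.List.pyRange 0 ((pvSyms q).length : Int) 1

def pvIdx (q : List (String × List String)) (s : String) : List Int :=
  (pvRows q).filter (fun j => decide (pvSym q j = s))

def pvKeys (q : List (String × List String)) : List String :=
  (q.filter (fun kv => decide (kv.1 ≠ "Symbol"))).map Prod.fst

-- the common normal form both ports are reduced to
def pvCanon (q : List (String × List String)) (symbols : List String) : List (String × List (String × List String)) :=
  (PySem.Set.ofList symbols).map (fun s =>
    (s, (pvKeys q).map (fun k => (k, (pvIdx q s).map (fun j => pvElem q k j)))))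

-- `insert` on a dict in value-function map form, at a key that is present
theorem pv_insert_mk_map {κ ν : Type} [BEq κ] [LawfulBEq κ] [DecidableEq κ] (S : List κ) (v : κ → ν)
    (k : κ) (hk : k ∈ S) (w : ν) :
    (PySem.Dict.mk (S.map (fun s => (s, v s)))).insert k w
      = PySem.Dict.mk (S.map (fun s => (s, if s = k then w else v s))) := by
  have hc : (PySem.Dict.mk (S.map (fun s => (s, v s)))).contains k = true := by
    rw [PySem.Dict.contains_eq_decide_mem_keys]
    simp [PySem.Dict.keys, hk]
  simp only [PySem.Dict.insert, hc, if_pos, List.map_map]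
  congr 1
  apply List.map_congr_left
  intro s _
  by_cases hs : s = k <;> simp [hs]

-- `getD` on a dict in value-function map form, at a key that is present
theorem pv_getD_mk_map {κ ν : Type} [BEq κ] [LawfulBEq κ] (S : List κ) (v : κ → ν)
    (k : κ) (hk : k ∈ S) (d0 : ν) :
    (PySem.Dict.mk (S.map (fun s => (s, v s)))).getD k d0 = v k := by
  induction S with
  | nil => simp at hk
  | cons a S ih =>
    rcases List.mem_cons.mp hk with h | h
    · subst h; simp [PySem.Dict.getD, PySem.Dict.get?]
    · by_cases ha : a = k
      · subst ha; simp [PySem.Dict.getD, PySem.Dict.get?]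
      · have := ih h
        simpa [PySem.Dict.getD, PySem.Dict.get?, ha] using this

-- `modify` on a dict in value-function map form, at a key that is present
theorem pv_modify_mk_map {κ ν : Type} [BEq κ] [LawfulBEq κ] [DecidableEq κ] (S : List κ) (v : κ → ν)
    (k : κ) (hk : k ∈ S) (d0 : ν) (f : ν → ν) :
    (PySem.Dict.mk (S.map (fun s => (s, v s)))).modify k d0 f
      = PySem.Dict.mk (S.map (fun s => (s, if s = k then f (v s) else v s))) := by
  simp only [PySem.Dict.modify, pv_getD_mk_map S v k hk d0, pv_insert_mk_map S v k hk]
  congr 1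
  apply List.map_congr_left
  intro s _
  by_cases hs : s = k <;> simp [hs]

-- a fold of `insert`s with a value function is the dict over the deduplicated key list
theorem pv_foldl_insert_dedup {κ ν : Type} [BEq κ] [LawfulBEq κ] [DecidableEq κ] (v : κ → ν) :
    ∀ (xs : List κ) (S : List κ),
    List.foldl (fun d k => d.insert k (v k)) (PySem.Dict.mk (S.map (fun s => (s, v s)))) xs
      = PySem.Dict.mk ((PySem.Set.update S xs).map (fun s => (s, v s))) := by
  intro xs
  induction xs with
  | nil => intro S; simp [PySem.Set.update]
  | cons k xs ih =>
    intro S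
    by_cases hk : k ∈ S
    · have h1 : (PySem.Dict.mk (S.map (fun s => (s, v s)))).insert k (v k)
          = PySem.Dict.mk (S.map (fun s => (s, v s))) := by
        rw [pv_insert_mk_map S v k hk]
        congr 1
        apply List.map_congr_left
        intro s _
        by_cases hs : s = k <;> simp [hs]
      have h2 : PySem.Set.add S k = S := by
        simp [PySem.Set.add, PySem.Set.contains, hk]
      simp only [List.foldl_cons, h1, ih, PySem.Set.update, h2]
    · have hc : (PySem.Dict.mk (S.map (fun s => (s, v s)))).contains k = false := by
        rw [PySem.Dict.contains_eq_decide_mem_keys]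
        simp [PySem.Dict.keys, hk]
      have h1 : (PySem.Dict.mk (S.map (fun s => (s, v s)))).insert k (v k)
          = PySem.Dict.mk ((S ++ [k]).map (fun s => (s, v s))) := by
        simp [PySem.Dict.insert, hc]
      have h2 : PySem.Set.add S k = S ++ [k] := by
        simp [PySem.Set.add, PySem.Set.contains, hk]
      simp only [List.foldl_cons, h1, ih, PySem.Set.update, h2]

-- a fold of `modify`s, keys drawn inside S, pointwise on the map form
theorem pv_foldl_modify_mk_map {κ ν β : Type} [BEq κ] [LawfulBEq κ] [DecidableEq κ] (S : List κ)
    (key : β → κ) (g : β → ν → ν) (d0 : ν) :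
    ∀ (rows : List β) (v : κ → ν), (∀ j ∈ rows, key j ∈ S) →
    List.foldl (fun d j => d.modify (key j) d0 (g j)) (PySem.Dict.mk (S.map (fun s => (s, v s)))) rows
      = PySem.Dict.mk (S.map (fun s =>
          (s, List.foldl (fun val j => if key j = s then g j val else val) (v s) rows))) := by
  intro rows
  induction rows with
  | nil => intro v _; simp
  | cons j rows ih =>
    intro v hmem
    have hj : key j ∈ S := hmem j (List.mem_cons_self ..)
    rw [List.foldl_cons, pv_modify_mk_map S v (key j) hj d0 (g j),
      ih (fun s => if s = key j then g j (v s) else v s)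
        (fun x hx => hmem x (List.mem_cons_of_mem _ hx))]
    congr 1
    apply List.map_congr_left
    intro s _
    by_cases hs : key j = s
    · simp [hs]
    · simp [hs, Ne.symm hs]

-- a fold that touches exactly one key of a Nodup list
theorem pv_foldl_if_single {κ ν : Type} [DecidableEq κ] (g : κ → ν → ν) (s : κ) :
    ∀ (F : List κ), F.Nodup → s ∈ F → ∀ (val : ν),
    List.foldl (fun val k => if k = s then g k val else val) val F = g s val := by
  intro F
  induction F with
  | nil => intro _ h; simp at h
  | cons a F ih =>
    intro hnd hs val
    rcases List.mem_cons.mp hs with h | h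
    · subst h
      have hne : ∀ k ∈ F, k ≠ s := fun k hk => by
        intro he; exact (List.nodup_cons.mp hnd).1 (he ▸ hk)
      rw [List.foldl_cons, if_pos rfl]
      calc List.foldl (fun val k => if k = s then g k val else val) (g s val) F
          = List.foldl (fun val _ => val) (g s val) F :=
            PySem.List.foldl_congr_mem F _ _ _ (fun acc k hk => by simp [hne k hk])
        _ = g s val := PySem.List.foldl_ignore ..
    · have ha : a ≠ s := by
        intro he; exact (List.nodup_cons.mp hnd).1 (he ▸ h)
      rw [List.foldl_cons, if_neg ha]
      exact ih (List.nodup_cons.mp hnd).2 h val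

theorem pv_keys_nodup (q : List (String × List String)) (hnd : (q.map Prod.fst).Nodup) :
    (pvKeys q).Nodup := by
  exact hnd.sublist (List.Sublist.map Prod.fst List.filter_sublist)

-- one data row of A's main loop, on an inner dict in map form
theorem pv_inner_row (q : List (String × List String)) (hnd : (q.map Prod.fst).Nodup)
    (j : Int) (w : String → List String) :
    List.foldl (fun inner kv =>
        if kv.1 ≠ "Symbol" then
          PySem.Dict.modify inner kv.1 [] (fun l => l ++ [pvElem q kv.1 j])
        else inner)
      (PySem.Dict.mk ((pvKeys q).map (fun k => (k, w k)))) q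
      = PySem.Dict.mk ((pvKeys q).map (fun k => (k, w k ++ [pvElem q k j]))) := by
  rw [PySem.List.foldl_ite_eq_foldl_filter (p := fun kv : String × List String => kv.1 ≠ "Symbol")]
  have hmap : List.foldl (fun inner kv =>
        PySem.Dict.modify inner kv.1 [] (fun l => l ++ [pvElem q kv.1 j]))
      (PySem.Dict.mk ((pvKeys q).map (fun k => (k, w k))))
      (q.filter (fun kv => decide (kv.1 ≠ "Symbol")))
      = List.foldl (fun inner k =>
        PySem.Dict.modify inner k [] (fun l => l ++ [pvElem q k j]))
      (PySem.Dict.mk ((pvKeys q).map (fun k => (k, w k)))) (pvKeys q) := by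
    rw [pvKeys, List.foldl_map]
  rw [hmap, pv_foldl_modify_mk_map (pvKeys q) (fun k => k)
    (fun k l => l ++ [pvElem q k j]) [] (pvKeys q) w (fun k hk => hk)]
  congr 1
  apply List.map_congr_left
  intro k hk
  rw [pv_foldl_if_single (fun k l => l ++ [pvElem q k j]) k (pvKeys q)
    (pv_keys_nodup q hnd) hk]

-- A's init phase
theorem pv_A_init (q : List (String × List String)) (symbols : List String)
    (hnd : (q.map Prod.fst).Nodup) :
    List.foldl (fun newQ symbol =>
        PySem.Dict.insert newQ symbol
          (List.foldl (fun inner kv =>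
            if kv.1 ≠ "Symbol" then PySem.Dict.insert inner kv.1 [] else inner)
            (PySem.Dict.mk []) q)) (PySem.Dict.mk []) symbols
      = PySem.Dict.mk ((PySem.Set.ofList symbols).map (fun s =>
          (s, PySem.Dict.mk ((pvKeys q).map (fun k => (k, ([] : List String))))))) := by
  have hinner : List.foldl (fun inner kv =>
        if kv.1 ≠ "Symbol" then PySem.Dict.insert inner kv.1 [] else inner)
        (PySem.Dict.mk []) q
      = PySem.Dict.mk ((pvKeys q).map (fun k => (k, ([] : List String)))) := by
    rw [PySem.List.foldl_ite_eq_foldl_filter (p := fun kv : String × List String => kv.1 ≠ "Symbol")]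
    apply PySem.Dict.ext
    rw [PySem.Dict.items_foldl_insert_fresh _ Prod.fst (fun _ => ([] : List String))
      (PySem.Dict.mk []) (fun a _ => by simp [PySem.Dict.contains_eq_decide_mem_keys, PySem.Dict.keys])
      (pv_keys_nodup q hnd)]
    simp [pvKeys]
  rw [hinner]
  have := pv_foldl_insert_dedup
    (v := fun _ : String => PySem.Dict.mk ((pvKeys q).map (fun k => (k, ([] : List String)))))
    symbols []
  simpa [PySem.Set.ofList_eq_foldl, PySem.Set.update] using this

-- membership of each looked-up row symbol
theorem pv_sym_mem (q : List (String × List String)) (symbols : List String)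
    (hsub : ∀ s ∈ pvSyms q, s ∈ symbols) :
    ∀ j ∈ pvRows q, pvSym q j ∈ PySem.Set.ofList symbols := by
  intro j hj
  rw [pvRows, PySem.List.mem_pyRange_one] at hj
  have h0 : (0 : Int) ≤ j := hj.1
  have hlt : j.toNat < (pvSyms q).length := by omega
  have : pvSym q j = (pvSyms q)[j.toNat] := by
    rw [pvSym, PySem.List.pyGetD, PySem.List.pyGet?_of_nonneg _ h0]
    simp [hlt]
  rw [PySem.Set.mem_ofList]
  exact hsub _ (this ▸ List.getElem_mem hlt)

-- A's main loop, reduced to the canonical per-symbol per-key gathered lists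
theorem pv_A_loop (q : List (String × List String)) (symbols : List String)
    (hnd : (q.map Prod.fst).Nodup) :
    ∀ (rows : List Int), (∀ j ∈ rows, pvSym q j ∈ PySem.Set.ofList symbols) →
    ∀ (v : String → String → List String),
    List.foldl (fun newQ i =>
        List.foldl (fun newQ kv =>
          if kv.1 ≠ "Symbol" then
            PySem.Dict.modify newQ (pvSym q i) (PySem.Dict.mk [])
              (fun inner => PySem.Dict.modify inner kv.1 []
                (fun l => l ++ [pvElem q kv.1 i]))
          else newQ) newQ q)
      (PySem.Dict.mk ((PySem.Set.ofList symbols).map (fun s =>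
        (s, PySem.Dict.mk ((pvKeys q).map (fun k => (k, v s k))))))) rows
      = PySem.Dict.mk ((PySem.Set.ofList symbols).map (fun s =>
          (s, PySem.Dict.mk ((pvKeys q).map (fun k =>
            (k, v s k ++ (rows.filter (fun j => decide (pvSym q j = s))).map
              (fun j => pvElem q k j))))))) := by
  intro rows
  induction rows with
  | nil => intro _ v; simp
  | cons j rows ih =>
    intro hmem v
    have hj : pvSym q j ∈ PySem.Set.ofList symbols := hmem j (List.mem_cons_self ..)
    -- one row: a fold over q of outer modifies at the constant key (pvSym q j)
    have hrow : List.foldl (fun newQ kv =>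
          if kv.1 ≠ "Symbol" then
            PySem.Dict.modify newQ (pvSym q j) (PySem.Dict.mk [])
              (fun inner => PySem.Dict.modify inner kv.1 []
                (fun l => l ++ [pvElem q kv.1 j]))
          else newQ)
        (PySem.Dict.mk ((PySem.Set.ofList symbols).map (fun s =>
          (s, PySem.Dict.mk ((pvKeys q).map (fun k => (k, v s k))))))) q
        = PySem.Dict.mk ((PySem.Set.ofList symbols).map (fun s =>
            (s, PySem.Dict.mk ((pvKeys q).map (fun k =>
              (k, if pvSym q j = s then v s k ++ [pvElem q k j] else v s k)))))) := by
      rw [PySem.List.foldl_ite_eq_foldl_filter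
        (p := fun kv : String × List String => kv.1 ≠ "Symbol")]
      rw [pv_foldl_modify_mk_map (PySem.Set.ofList symbols)
        (fun _ : String × List String => pvSym q j)
        (fun kv inner => PySem.Dict.modify inner kv.1 [] (fun l => l ++ [pvElem q kv.1 j]))
        (PySem.Dict.mk []) _ _ (fun _ _ => hj)]
      congr 1
      apply List.map_congr_left
      intro s _
      by_cases hs : pvSym q j = s
      · simp only [hs, Prod.mk.injEq, true_and]
        have : List.foldl (fun val kv =>
              PySem.Dict.modify val kv.1 [] (fun l => l ++ [pvElem q kv.1 j]))
            (PySem.Dict.mk ((pvKeys q).map (fun k => (k, v s k))))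
            (q.filter (fun kv => decide (kv.1 ≠ "Symbol")))
            = PySem.Dict.mk ((pvKeys q).map (fun k => (k, v s k ++ [pvElem q k j]))) := by
          have := pv_inner_row q hnd j (v s)
          rw [PySem.List.foldl_ite_eq_foldl_filter
            (p := fun kv : String × List String => kv.1 ≠ "Symbol")] at this
          exact this
        simpa using this
      · simp [hs]
    rw [List.foldl_cons, hrow,
      ih (fun x hx => hmem x (List.mem_cons_of_mem _ hx))
        (fun s k => if pvSym q j = s then v s k ++ [pvElem q k j] else v s k)]
    congr 1
    apply List.map_congr_left
    intro s _
    congr 1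
    congr 1
    apply List.map_congr_left
    intro k _
    by_cases hs : pvSym q j = s <;> simp [hs]

-- A equals the canonical form
theorem pv_A_eq_canon (q : List (String × List String)) (symbols : List String)
    (hnd : (q.map Prod.fst).Nodup) (hsub : ∀ s ∈ pvSyms q, s ∈ symbols) :
    reformatQuotes q symbols = pvCanon q symbols := by
  unfold reformatQuotes
  simp only []
  rw [pv_A_init q symbols hnd]
  rw [show (PySem.Dict.mk q).getD "Symbol" [] = pvSyms q from rfl]
  rw [show PySem.List.pyRange 0 ((pvSyms q).length : Int) 1 = pvRows q from rfl]
  simp only [show ∀ (k : String) (i : Int),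
    PySem.List.pyGetD ((PySem.Dict.mk q).getD k []) i "" = pvElem q k i from fun _ _ => rfl]
  simp only [show ∀ (i : Int), PySem.List.pyGetD (pvSyms q) i "" = pvSym q i from fun _ => rfl]
  rw [pv_A_loop q symbols hnd (pvRows q) (pv_sym_mem q symbols hsub)
    (fun _ _ => [])]
  unfold pvCanon pvIdx
  simp [List.map_map, Function.comp_def]

-- B's index map
theorem pv_B_indexMap (q : List (String × List String)) (symbols : List String)
    (hsub : ∀ s ∈ pvSyms q, s ∈ symbols) :
    List.foldl (fun m p => PySem.Dict.modify m p.2 [] (fun l => l ++ [p.1]))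
      (List.foldl (fun m s => PySem.Dict.insert m s []) (PySem.Dict.mk []) symbols)
      (PySem.List.enumerate (pvSyms q))
      = PySem.Dict.mk ((PySem.Set.ofList symbols).map (fun s => (s, pvIdx q s))) := by
  have hinit : List.foldl (fun m s => PySem.Dict.insert m s ([] : List Int))
      (PySem.Dict.mk []) symbols
      = PySem.Dict.mk ((PySem.Set.ofList symbols).map (fun s => (s, ([] : List Int)))) := by
    have := pv_foldl_insert_dedup (v := fun _ : String => ([] : List Int)) symbols []
    simpa [PySem.Set.ofList_eq_foldl, PySem.Set.update] using this
  rw [hinit, PySem.List.enumerate_eq_map_pyRange (pvSyms q) "", List.foldl_map]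
  have hrows : PySem.List.pyRange 0 (PySem.List.len (pvSyms q)) 1 = pvRows q := by
    simp [pvRows, PySem.List.len_eq]
  rw [hrows]
  rw [pv_foldl_modify_mk_map (PySem.Set.ofList symbols)
    (fun j : Int => PySem.List.pyGetD (pvSyms q) j "")
    (fun j l => l ++ [j]) [] (pvRows q) _ (pv_sym_mem q symbols hsub)]
  congr 1
  apply List.map_congr_left
  intro s _
  rw [PySem.List.foldl_ite_eq_foldl_filter
    (p := fun j : Int => PySem.List.pyGetD (pvSyms q) j "" = s)]
  rw [PySem.List.foldl_append_singleton_eq_self]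
  rfl

-- B equals the canonical form
theorem pv_B_eq_canon (q : List (String × List String)) (symbols : List String)
    (hnd : (q.map Prod.fst).Nodup) (hsub : ∀ s ∈ pvSyms q, s ∈ symbols) :
    reformatQuotes_alt q symbols = pvCanon q symbols := by
  unfold reformatQuotes_alt
  simp only []
  rw [show (PySem.Dict.mk q).getD "Symbol" [] = pvSyms q from rfl]
  rw [pv_B_indexMap q symbols hsub]
  have hinner : ∀ s : String,
      (List.foldl (fun inner kv =>
          if kv.1 ≠ "Symbol" then
            PySem.Dict.insert inner kv.1
              (((PySem.Dict.mk ((PySem.Set.ofList symbols).map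
                  (fun s => (s, pvIdx q s)))).getD s []).map
                (fun i => PySem.List.pyGetD ((PySem.Dict.mk q).getD kv.1 []) i ""))
          else inner) (PySem.Dict.mk []) q).items
        = (pvKeys q).map (fun k =>
            (k, ((PySem.Dict.mk ((PySem.Set.ofList symbols).map
                (fun s => (s, pvIdx q s)))).getD s []).map
              (fun j => pvElem q k j))) := by
    intro s
    rw [PySem.List.foldl_ite_eq_foldl_filter
      (p := fun kv : String × List String => kv.1 ≠ "Symbol")]
    rw [PySem.Dict.items_foldl_insert_fresh _ Prod.fst
      (fun kv : String × List String =>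
        (((PySem.Dict.mk ((PySem.Set.ofList symbols).map
            (fun s => (s, pvIdx q s)))).getD s []).map
          (fun i => PySem.List.pyGetD ((PySem.Dict.mk q).getD kv.1 []) i "")))
      (PySem.Dict.mk [])
      (fun a _ => by simp [PySem.Dict.contains_eq_decide_mem_keys, PySem.Dict.keys])
      (pv_keys_nodup q hnd)]
    simp [pvKeys, List.map_map, Function.comp_def, pvElem]
  have houter := pv_foldl_insert_dedup
    (v := fun symbol : String =>
      (List.foldl (fun inner kv =>
          if kv.1 ≠ "Symbol" then
            PySem.Dict.insert inner kv.1
              (((PySem.Dict.mk ((PySem.Set.ofList symbols).map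
                  (fun s => (s, pvIdx q s)))).getD symbol []).map
                (fun i => PySem.List.pyGetD ((PySem.Dict.mk q).getD kv.1 []) i ""))
          else inner) (PySem.Dict.mk []) q).items)
    symbols []
  simp only [PySem.Set.update, List.map_nil] at houter
  rw [show (List.foldl PySem.Set.add [] symbols : List String) = PySem.Set.ofList symbols
      from (PySem.Set.ofList_eq_foldl symbols).symm] at houter
  rw [houter]
  unfold pvCanon
  apply List.map_congr_left
  intro s hs
  rw [hinner s]
  congr 1
  apply List.map_congr_left
  intro k _
  rw [pv_getD_mk_map (PySem.Set.ofList symbols) (pvIdx q) s hs]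

-- ===== VERDICT (by name: the statement is the Claim_ definition above) =====
theorem reformatQuotes_spec : Claim_equal_reformatQuotes := by
  intro q symbols _ hpre
  obtain ⟨hnd, _, hsub, _⟩ := hpre
  unfold Spec_reformatQuotes
  rw [pv_A_eq_canon q symbols hnd hsub, pv_B_eq_canon q symbols hnd hsub]
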